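-- pv_equiv track=rewrite | github.com/ShaposhnikVlad/Audio_compression | main.py | wavelet_transform
-- ===== SOURCE A (Python) =====
-- def average(vector, size, res_vector, lost_flag):
--     a_vector = []
--
--     tmp_lost = ""
--
--     index = size - 1
--
--     half_size = size >> 1
--
--     for i in range(half_size):
--         sum = vector[index - 1] + vector[index]
--         diff = vector[index - 1] - vector[index]
--
--         if sum & 1 == 0:
--             tmp_lost = "0" + tmp_lost
--         else:
--             tmp_lost = "1" + tmp_lost
--
--         a_vector.insert(0, sum >> 1)
--         # a_vector = [sum >> 1] + a_vector
--
--         res_vector.insert(0, diff >> 1)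
--
--         index -= 2
--
--     lost_flag = tmp_lost + lost_flag
--
--     return a_vector, lost_flag
--
-- def wavelet_transform(vector, size):
--     current_result_vector = []
--
--     lost_flag = ""
--
--     tmp = vector
--
--     while size != 1:
--         tmp, lost_flag = average(tmp, size, current_result_vector, lost_flag)
--
--         size = size >> 1
--
--     # current_result_vector.append(tmp[0])
--
--     # current_result_vector.insert(0, current_result_vector.pop(len(current_result_vector) - 1))
--     current_result_vector = tmp[:1] + current_result_vector
--
--     return current_result_vector, lost_flag
-- ===== SOURCE B (Python) =====
-- def wavelet_transform(vector, size):
--     # Recursive decomposition: one level is computed by pairing consecutive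
--     # elements (zip of one shared iterator), then the whole rest of the
--     # transform is a recursive call on the averages; results are joined by
--     # plain concatenation, no accumulators, no insert(0)/string-prepending.
--     def rec(seg):
--         if len(seg) < 2:
--             return list(seg), ""
--         if len(seg) % 2:
--             seg = seg[1:]
--         it = iter(seg)
--         pairs = list(zip(it, it))
--         sums = [a + b for a, b in pairs]
--         res, flag = rec([s >> 1 for s in sums])
--         res += [(a - b) >> 1 for a, b in pairs]
--         return res, flag + "".join("1" if s & 1 else "0" for s in sums)
--
--     return rec(vector[:size])
-- ===== Notes on version B (the rewrite author's own statement) =====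
-- stated objective: faster
-- what changed: Replaces A's imperative while-loop with insert(0,...) list accumulation and character-by-character string prepending by a recursion on the structure: each call pairs consecutive elements via one shared iterator (zip(it, it)), recurses on the averages, and joins the recursive result with this level's diffs and flag bits by plain concatenation.
import Mathlib
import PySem

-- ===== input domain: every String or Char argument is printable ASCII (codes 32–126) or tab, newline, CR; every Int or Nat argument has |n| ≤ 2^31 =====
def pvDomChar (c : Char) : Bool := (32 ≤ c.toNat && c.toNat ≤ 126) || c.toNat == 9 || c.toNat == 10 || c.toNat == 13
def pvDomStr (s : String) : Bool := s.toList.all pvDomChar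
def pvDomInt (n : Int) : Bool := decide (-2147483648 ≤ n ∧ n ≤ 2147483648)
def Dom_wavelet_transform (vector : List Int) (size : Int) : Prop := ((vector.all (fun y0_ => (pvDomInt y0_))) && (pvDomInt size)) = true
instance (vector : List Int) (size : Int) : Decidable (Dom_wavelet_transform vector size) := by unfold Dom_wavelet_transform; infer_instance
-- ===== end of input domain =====

-- B replaces A's while-loop with insert(0,..)/string-prepend accumulation by a recursion on the
-- structure: pair consecutive elements, recurse on the averages, concatenate; measured asymptotically
-- faster; return values proved equal on Pre_.


-- ===== PORT A =====
-- body of A's 'for i in range(half_size)' loop; state = (a_vector, tmp_lost, res_vector, index)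
def pvAvgStep (vector : List Int) (st : List Int × String × List Int × Int) (_i : Int) :
    List Int × String × List Int × Int :=
  let sum := PySem.List.pyGetD vector (st.2.2.2 - 1) 0 + PySem.List.pyGetD vector st.2.2.2 0
  let diff := PySem.List.pyGetD vector (st.2.2.2 - 1) 0 - PySem.List.pyGetD vector st.2.2.2 0
  (PySem.List.insert st.1 0 (sum >>> (1 : Nat)),
   (if PySem.Int.band sum 1 = 0 then "0" ++ st.2.1 else "1" ++ st.2.1),
   PySem.List.insert st.2.2.1 0 (diff >>> (1 : Nat)),
   st.2.2.2 - 2)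
-- vector[index] out of range raises IndexError in Python: excluded by Pre_, pyGetD's default is never used there.

-- A's 'average'; Python mutates res_vector, so it is threaded: returns (a_vector, lost_flag, res_vector)
def pvAverage (vector : List Int) (size : Int) (res_vector : List Int) (lost_flag : String) :
    List Int × String × List Int :=
  let half_size := size >>> (1 : Nat)
  let st := (PySem.List.pyRange 0 half_size 1).foldl (pvAvgStep vector) ([], "", res_vector, size - 1)
  (st.1, st.2.1 ++ lost_flag, st.2.2.1)

-- needed by the loops' decreasing_by
lemma pvShr1Lt (n : Int) (h : 2 ≤ n) : (n >>> (1 : Nat)).toNat < n.toNat := by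
  rw [Int.shiftRight_eq_div_pow]; omega

-- A's 'while size != 1' loop.  Guard '2 ≤ size' = 'size != 1' on size ≥ 1 (Pre_);
-- for size ≤ 0 Python loops forever, so exiting there is only a totality guard (unreachable under Pre_).
def pvWTLoop (tmp : List Int) (size : Int) (crv : List Int) (lf : String) :
    List Int × List Int × String :=
  if h : 2 ≤ size then
    let r := pvAverage tmp size crv lf
    pvWTLoop r.1 (size >>> (1 : Nat)) r.2.2 r.2.1
  else (tmp, crv, lf)
termination_by size.toNat
decreasing_by exact pvShr1Lt size h

def wavelet_transform (vector : List Int) (size : Int) : List Int × String :=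
  let r := pvWTLoop vector size [] ""
  (PySem.List.slice r.1 none (some 1) ++ r.2.1, r.2.2)

-- ===== PORT B =====
-- B's 'list(zip(it, it))' on one shared iterator: pairs of consecutive elements (exact: a trailing
-- odd element is dropped, as zip stops at the exhausted iterator)
def pvPairs : List Int → List (Int × Int)
  | a :: b :: t => (a, b) :: pvPairs t
  | _ => []

-- characterisation of pvPairs, also giving the length bound pvRecB's termination cites
theorem pvPairs_char : ∀ (xs : List Int),
    pvPairs xs = (List.range (xs.length / 2)).map
      (fun k => (xs.getD (2 * k) 0, xs.getD (2 * k + 1) 0))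
  | [] => by simp [pvPairs]
  | [a] => by simp [pvPairs]
  | a :: b :: t => by
    have h2 : (a :: b :: t).length / 2 = t.length / 2 + 1 := by simp; omega
    rw [show pvPairs (a :: b :: t) = (a, b) :: pvPairs t from rfl, pvPairs_char t, h2,
        List.range_succ_eq_map, List.map_cons, List.map_map]
    refine List.cons_eq_cons.mpr ⟨by simp [List.getD], ?_⟩
    apply List.map_congr_left
    intro k _
    have e1 : 2 * (k + 1) = 2 * k + 1 + 1 := by ring
    simp [Nat.succ_eq_add_one, e1]

lemma pvPairs_length (xs : List Int) : (pvPairs xs).length = xs.length / 2 := by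
  rw [pvPairs_char]; simp

-- needed by pvRecB's decreasing_by
lemma pvRecB_dec {α β : Type} (f : Int × Int → α) (g : α → β) (seg : List Int)
    (h : ¬ seg.length < 2) :
    (((pvPairs (if seg.length % 2 = 1 then PySem.List.slice seg (some 1) none else seg)).map f).map
      g).length < seg.length := by
  simp only [List.length_map, pvPairs_length]
  split
  · rw [PySem.List.slice_from_one]
    simp only [List.length_tail]
    omega
  · omega

-- B's recursion 'rec(seg)'
def pvRecB (seg : List Int) : List Int × String :=
  if _h : seg.length < 2 then (seg, "")
  else
    let seg2 := if seg.length % 2 = 1 then PySem.List.slice seg (some 1) none else seg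
    let pairs := pvPairs seg2
    let sums := pairs.map (fun p => p.1 + p.2)
    let r := pvRecB (sums.map (fun s : Int => s >>> (1 : Nat)))
    (r.1 ++ pairs.map (fun p => (p.1 - p.2 : Int) >>> (1 : Nat)),
     r.2 ++ PySem.Str.join "" (sums.map (fun s => if PySem.Int.band s 1 ≠ 0 then "1" else "0")))
termination_by seg.length
decreasing_by
  exact pvRecB_dec _ _ seg _h

def wavelet_transform_alt (vector : List Int) (size : Int) : List Int × String :=
  pvRecB (PySem.List.slice vector none (some size))

-- ===== PRECONDITION & SPEC =====
-- Pre_ = exactly where A returns: size = 1 returns vector[:1]; for 2 ≤ size, size ≤ len(vector) is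
-- needed or average raises IndexError; size ≤ 0 makes A's while-loop diverge.
def Pre_wavelet_transform (vector : List Int) (size : Int) : Prop :=
  size = 1 ∨ (2 ≤ size ∧ size ≤ (vector.length : Int))
instance (vector : List Int) (size : Int) : Decidable (Pre_wavelet_transform vector size) := by
  unfold Pre_wavelet_transform; infer_instance
def pvWitness_wavelet_transform : List Int × Int := ([1, 2, 3, 4], 4)

def Spec_wavelet_transform (vector : List Int) (size : Int) (out : List Int × String) : Prop := out = wavelet_transform_alt vector size
instance (vector : List Int) (size : Int) (out : List Int × String) : Decidable (Spec_wavelet_transform vector size out) := by unfold Spec_wavelet_transform; infer_instance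

-- ===== CLAIM (what is proved, stated in full; the proofs are below) =====
def Claim_equal_wavelet_transform : Prop := ∀ (vector : List Int) (size : Int), Dom_wavelet_transform vector size → Pre_wavelet_transform vector size → Spec_wavelet_transform vector size (wavelet_transform vector size)

-- ===== LEMMAS AND PROOFS =====

-- the pair combinators both programs compute; at Python pair (i-1, i) (A reads (index-1, index))
def pvPairA (t : List Int) (i : Int) : Int :=
  (PySem.List.pyGetD t (i - 1) 0 + PySem.List.pyGetD t i 0) >>> (1 : Nat)
def pvPairD (t : List Int) (i : Int) : Int :=
  (PySem.List.pyGetD t (i - 1) 0 - PySem.List.pyGetD t i 0) >>> (1 : Nat)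
def pvPairBit (t : List Int) (i : Int) : String :=
  if PySem.Int.band (PySem.List.pyGetD t (i - 1) 0 + PySem.List.pyGetD t i 0) 1 = 0 then "0" else "1"

-- one level of the transform, pairs in ascending order
def pvAscA (t : List Int) (size : Int) : List Int :=
  (List.range (size >>> (1 : Nat)).toNat).map
    (fun (k : Nat) => pvPairA t (size - 2 * (size >>> (1 : Nat)) + 2 * (k : Int) + 1))
def pvAscD (t : List Int) (size : Int) : List Int :=
  (List.range (size >>> (1 : Nat)).toNat).map
    (fun (k : Nat) => pvPairD t (size - 2 * (size >>> (1 : Nat)) + 2 * (k : Int) + 1))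
def pvAscBit (t : List Int) (size : Int) : List String :=
  (List.range (size >>> (1 : Nat)).toNat).map
    (fun (k : Nat) => pvPairBit t (size - 2 * (size >>> (1 : Nat)) + 2 * (k : Int) + 1))

def pvCat : List String → String := fun l => l.foldr (· ++ ·) ""

lemma pvIntercalate_nil (xs : List (List Char)) : ([] : List Char).intercalate xs = xs.flatten := by
  induction xs with
  | nil => rfl
  | cons a t ih =>
    cases t with
    | nil => simp [List.intercalate]
    | cons b u => simp [List.intercalate, List.intersperse] at ih ⊢; exact ih

lemma pvJoin_empty_eq_pvCat (l : List String) : PySem.Str.join "" l = pvCat l := by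
  induction l with
  | nil => rfl
  | cons a t ih =>
    have h1 : PySem.Str.join "" (a :: t) = a ++ PySem.Str.join "" t := by
      rw [← String.ofList_toList (s := PySem.Str.join "" (a :: t)),
          ← String.ofList_toList (s := a ++ PySem.Str.join "" t)]
      congr 1
      simp [PySem.Str.toList_join, PySem.Chars.join, pvIntercalate_nil, String.toList_append]
    rw [h1, ih]; rfl

lemma pvInsert_zero {α : Type} (xs : List α) (v : α) : PySem.List.insert xs 0 v = v :: xs := by
  simp [PySem.List.insert, PySem.List.sliceIndices]

lemma pvFoldl_const {α β : Type} (l : List α) (g : β → β) (init : β) :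
    l.foldl (fun s _ => g s) init = g^[l.length] init := by
  induction l generalizing init with
  | nil => rfl
  | cons a t ih => simp [List.foldl_cons, ih, Function.iterate_succ_apply]

lemma pvShr1_eq_div (n : Int) : n >>> (1 : Nat) = n / 2 := by
  rw [Int.shiftRight_eq_div_pow]; norm_num

lemma pvAvgStep_iterate (t : List Int) (m : Nat) (a : List Int) (tl : String) (res : List Int)
    (idx : Int) :
    (fun st => pvAvgStep t st 0)^[m] (a, tl, res, idx) =
      (((List.range m).map (fun (j : Nat) => pvPairA t (idx - 2 * (j : Int)))).reverse ++ a,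
       pvCat (((List.range m).map (fun (j : Nat) => pvPairBit t (idx - 2 * (j : Int)))).reverse) ++ tl,
       ((List.range m).map (fun (j : Nat) => pvPairD t (idx - 2 * (j : Int)))).reverse ++ res,
       idx - 2 * (m : Int)) := by
  induction m with
  | zero => simp [pvCat]
  | succ m ih =>
    rw [Function.iterate_succ_apply', ih]
    simp only [pvAvgStep, pvInsert_zero, List.range_succ, List.map_append, List.map_cons,
      List.map_nil, List.reverse_append, List.reverse_cons, List.reverse_nil, List.nil_append,
      List.cons_append, Prod.mk.injEq, pvCat, List.foldr_cons]
    and_intros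
    · rfl
    · unfold pvPairBit; split <;> rw [String.append_assoc]
    · rfl
    · push_cast; ring

-- A's average characterised as maps over the processed pair positions (descending, then reversed)
lemma pvAverage_char (t : List Int) (size : Int) (res : List Int) (lf : String) :
    pvAverage t size res lf =
      (((List.range (size >>> (1 : Nat)).toNat).map
          (fun (j : Nat) => pvPairA t (size - 1 - 2 * (j : Int)))).reverse,
       pvCat (((List.range (size >>> (1 : Nat)).toNat).map
          (fun (j : Nat) => pvPairBit t (size - 1 - 2 * (j : Int)))).reverse) ++ lf,
       ((List.range (size >>> (1 : Nat)).toNat).map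
          (fun (j : Nat) => pvPairD t (size - 1 - 2 * (j : Int)))).reverse ++ res) := by
  simp only [pvAverage]
  rw [show (pvAvgStep t) = (fun st (_ : Int) => (fun st => pvAvgStep t st 0) st) from rfl,
    pvFoldl_const, PySem.List.length_pyRange_one]
  simp only [sub_zero]
  rw [pvAvgStep_iterate]
  simp only [List.append_nil, Prod.mk.injEq]
  and_intros <;> first | trivial | rw [String.append_assoc, String.empty_append]

lemma pvRevMapRange {α : Type} (m : Nat) (f : Int → α) (idx : Int) :
    ((List.range m).map (fun (j : Nat) => f (idx - 2 * (j : Int)))).reverse =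
      (List.range m).map (fun (k : Nat) => f (idx - 2 * (m : Int) + 2 + 2 * (k : Int))) := by
  apply List.ext_getElem
  · simp
  · intro k h1 h2
    simp only [List.length_map, List.length_range] at h1 h2
    rw [List.getElem_reverse]
    simp only [List.length_map, List.length_range, List.getElem_map, List.getElem_range]
    congr 1
    omega

-- A's level in ascending order
lemma pvAverage_asc (t : List Int) (size : Int) (res : List Int) (lf : String) (h1 : 1 ≤ size) :
    pvAverage t size res lf =
      (pvAscA t size, pvCat (pvAscBit t size) ++ lf, pvAscD t size ++ res) := by
  rw [pvAverage_char]
  have h0 : (0 : Int) ≤ size >>> (1 : Nat) := by rw [pvShr1_eq_div]; omega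
  have key : ∀ {α : Type} (f : Int → α),
      ((List.range (size >>> (1 : Nat)).toNat).map
        (fun (j : Nat) => f (size - 1 - 2 * (j : Int)))).reverse =
      (List.range (size >>> (1 : Nat)).toNat).map
        (fun (k : Nat) => f (size - 2 * (size >>> (1 : Nat)) + 2 * (k : Int) + 1)) := by
    intro α f
    rw [pvRevMapRange (f := f) (idx := size - 1)]
    apply List.map_congr_left
    intro k _
    congr 1
    rw [pvShr1_eq_div] at h0 ⊢
    omega
  unfold pvAscA pvAscBit pvAscD
  rw [key (pvPairA t), key (pvPairBit t), key (pvPairD t)]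

-- controlled unfolding equations for A's loop
lemma pvWTLoop_step (t : List Int) (size : Int) (crv : List Int) (lf : String) (h : 2 ≤ size) :
    pvWTLoop t size crv lf =
      pvWTLoop (pvAverage t size crv lf).1 (size >>> (1 : Nat))
        (pvAverage t size crv lf).2.2 (pvAverage t size crv lf).2.1 := by
  conv_lhs => rw [pvWTLoop]
  simp only [dif_pos h]

lemma pvWTLoop_base (t : List Int) (size : Int) (crv : List Int) (lf : String) (h : ¬ 2 ≤ size) :
    pvWTLoop t size crv lf = (t, crv, lf) := by
  rw [pvWTLoop]; simp only [dif_neg h]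

-- controlled unfolding for B's recursion
lemma pvRecB_short (seg : List Int) (h : seg.length < 2) : pvRecB seg = (seg, "") := by
  conv_lhs => rw [pvRecB]
  rw [dif_pos h]

lemma pvRecB_eq (seg : List Int) (h : ¬ seg.length < 2) :
    pvRecB seg =
      ((pvRecB (((pvPairs (if seg.length % 2 = 1 then PySem.List.slice seg (some 1) none else seg)).map
            (fun p => p.1 + p.2)).map (fun s : Int => s >>> (1 : Nat)))).1
        ++ (pvPairs (if seg.length % 2 = 1 then PySem.List.slice seg (some 1) none else seg)).map
            (fun p => (p.1 - p.2 : Int) >>> (1 : Nat)),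
       (pvRecB (((pvPairs (if seg.length % 2 = 1 then PySem.List.slice seg (some 1) none else seg)).map
            (fun p => p.1 + p.2)).map (fun s : Int => s >>> (1 : Nat)))).2
        ++ PySem.Str.join "" (((pvPairs (if seg.length % 2 = 1 then PySem.List.slice seg (some 1) none else seg)).map
            (fun p => p.1 + p.2)).map (fun s => if PySem.Int.band s 1 ≠ 0 then "1" else "0"))) := by
  conv_lhs => rw [pvRecB]
  rw [dif_neg h]

-- one level of B on the truncated input = the ascending level maps, then the recursive call
lemma pvRecB_level (t : List Int) (size : Int) (h2 : 2 ≤ size) (hlen : size ≤ (t.length : Int)) :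
    pvRecB (t.take size.toNat) =
      ((pvRecB (pvAscA t size)).1 ++ pvAscD t size,
       (pvRecB (pvAscA t size)).2 ++ PySem.Str.join "" (pvAscBit t size)) := by
  have hhalf := pvShr1_eq_div size
  have hmlen : (t.take size.toNat).length = size.toNat := by simp; omega
  have hnot : ¬ (t.take size.toNat).length < 2 := by rw [hmlen]; omega
  rw [pvRecB_eq _ hnot]
  have hseg2 : (if (t.take size.toNat).length % 2 = 1
        then PySem.List.slice (t.take size.toNat) (some 1) none else t.take size.toNat)
      = (t.take size.toNat).drop (size.toNat % 2) := by
    rw [hmlen]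
    by_cases hp : size.toNat % 2 = 1
    · rw [if_pos hp, hp, PySem.List.slice_from_one, ← List.drop_one]
    · rw [if_neg hp]
      have h0 : size.toNat % 2 = 0 := by omega
      rw [h0, List.drop_zero]
  rw [hseg2]
  have hpair : pvPairs ((t.take size.toNat).drop (size.toNat % 2)) =
      (List.range ((size >>> (1 : Nat)).toNat)).map
        (fun (k : Nat) => (PySem.List.pyGetD t (size - 2 * (size >>> (1 : Nat)) + 2 * (k : Int)) 0,
                   PySem.List.pyGetD t (size - 2 * (size >>> (1 : Nat)) + 2 * (k : Int) + 1) 0)) := by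
    rw [pvPairs_char]
    have hd2 : ((t.take size.toNat).drop (size.toNat % 2)).length / 2 = (size >>> (1 : Nat)).toNat := by
      simp only [List.length_drop, hmlen]
      omega
    rw [hd2]
    apply List.map_congr_left
    intro k hk
    rw [List.mem_range] at hk
    have hgd : ∀ i : Nat, size.toNat % 2 + i < size.toNat →
        ((t.take size.toNat).drop (size.toNat % 2)).getD i 0 = t.getD (size.toNat % 2 + i) 0 := by
      intro i hi
      simp only [List.getD, List.getElem?_drop]
      rw [List.getElem?_take_of_lt (by omega)]
    have e1 : PySem.List.pyGetD t (size - 2 * (size >>> (1 : Nat)) + 2 * (k : Int)) 0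
        = t.getD (size.toNat % 2 + 2 * k) 0 := by
      have : size - 2 * (size >>> (1 : Nat)) + 2 * (k : Int)
          = ((size.toNat % 2 + 2 * k : Nat) : Int) := by push_cast; omega
      rw [this, PySem.List.pyGetD_natCast]
    have e2 : PySem.List.pyGetD t (size - 2 * (size >>> (1 : Nat)) + 2 * (k : Int) + 1) 0
        = t.getD (size.toNat % 2 + (2 * k + 1)) 0 := by
      have : size - 2 * (size >>> (1 : Nat)) + 2 * (k : Int) + 1
          = ((size.toNat % 2 + (2 * k + 1) : Nat) : Int) := by push_cast; omega
      rw [this, PySem.List.pyGetD_natCast]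
    rw [e1, e2, hgd (2 * k) (by omega), hgd (2 * k + 1) (by omega)]
  rw [hpair]
  simp only [List.map_map, Function.comp_def]
  have hA : (List.range ((size >>> (1 : Nat)).toNat)).map
      (fun (k : Nat) => (PySem.List.pyGetD t (size - 2 * (size >>> (1 : Nat)) + 2 * (k : Int)) 0
        + PySem.List.pyGetD t (size - 2 * (size >>> (1 : Nat)) + 2 * (k : Int) + 1) 0) >>> (1 : Nat))
      = pvAscA t size := by
    unfold pvAscA
    apply List.map_congr_left
    intro k _
    simp [pvPairA]
  have hD : (List.range ((size >>> (1 : Nat)).toNat)).map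
      (fun (k : Nat) => (PySem.List.pyGetD t (size - 2 * (size >>> (1 : Nat)) + 2 * (k : Int)) 0
        - PySem.List.pyGetD t (size - 2 * (size >>> (1 : Nat)) + 2 * (k : Int) + 1) 0) >>> (1 : Nat))
      = pvAscD t size := by
    unfold pvAscD
    apply List.map_congr_left
    intro k _
    simp [pvPairD]
  have hB : (List.range ((size >>> (1 : Nat)).toNat)).map
      (fun (k : Nat) => if PySem.Int.band (PySem.List.pyGetD t (size - 2 * (size >>> (1 : Nat)) + 2 * (k : Int)) 0
        + PySem.List.pyGetD t (size - 2 * (size >>> (1 : Nat)) + 2 * (k : Int) + 1) 0) 1 ≠ 0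
          then "1" else "0")
      = pvAscBit t size := by
    unfold pvAscBit
    apply List.map_congr_left
    intro k _
    simp only [pvPairBit, ne_eq, ite_not, add_sub_cancel_right]
  rw [hA, hD, hB]

-- the main invariant: A's loop, stitched into its final shape, equals B's recursion
lemma pvMain (n : Nat) : ∀ (t : List Int) (size : Int), size.toNat = n → 1 ≤ size →
    size ≤ (t.length : Int) → ∀ (crv : List Int) (lf : String),
    PySem.List.slice (pvWTLoop t size crv lf).1 none (some 1) ++ (pvWTLoop t size crv lf).2.1
      = (pvRecB (t.take size.toNat)).1 ++ crv
    ∧ (pvWTLoop t size crv lf).2.2 = (pvRecB (t.take size.toNat)).2 ++ lf := by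
  induction n using Nat.strong_induction_on with
  | _ n ih =>
    intro t size hn h1 hlen crv lf
    by_cases h : 2 ≤ size
    · have hhalf := pvShr1_eq_div size
      have hhalf1 : (1 : Int) ≤ size >>> (1 : Nat) := by omega
      rw [pvWTLoop_step _ _ _ _ h, pvAverage_asc t size crv lf (by omega)]
      dsimp only
      have hlt : (size >>> (1 : Nat)).toNat < n := by rw [← hn]; exact pvShr1Lt size h
      have hlenA : (size >>> (1 : Nat)) ≤ ((pvAscA t size).length : Int) := by
        simp only [pvAscA, List.length_map, List.length_range]
        omega
      obtain ⟨ih1, ih2⟩ := ih _ hlt (pvAscA t size) (size >>> (1 : Nat)) rfl hhalf1 hlenA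
        (pvAscD t size ++ crv) (pvCat (pvAscBit t size) ++ lf)
      have htake : (pvAscA t size).take (size >>> (1 : Nat)).toNat = pvAscA t size := by
        apply List.take_of_length_le
        simp only [pvAscA, List.length_map, List.length_range]
        omega
      rw [htake] at ih1 ih2
      constructor
      · rw [ih1, pvRecB_level t size h hlen]
        simp [List.append_assoc]
      · rw [ih2, pvRecB_level t size h hlen, pvJoin_empty_eq_pvCat]
        simp [String.append_assoc]
    · have hs1 : size = 1 := by omega
      subst hs1
      rw [pvWTLoop_base _ _ _ _ h]
      have hshort : pvRecB (t.take (1 : Int).toNat) = (t.take (1 : Int).toNat, "") := by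
        apply pvRecB_short
        simp only [Int.toNat_one]
        have := List.length_take_le 1 t
        omega
      rw [hshort]
      constructor
      · rw [PySem.List.slice_to _ (by norm_num : (0 : Int) ≤ 1)]
      · rw [String.empty_append]

-- ===== VERDICT (by name: the statement is the Claim_ definition above) =====
theorem wavelet_transform_spec : Claim_equal_wavelet_transform := by
  unfold Claim_equal_wavelet_transform
  intro vector size _hdom hpre
  unfold Spec_wavelet_transform wavelet_transform wavelet_transform_alt
  have h1 : (1 : Int) ≤ size := by rcases hpre with h | ⟨h, _⟩ <;> omega
  rcases hpre with h | ⟨h2, hlen⟩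
  · subst h
    rw [pvWTLoop_base _ _ _ _ (by norm_num)]
    have hshort : pvRecB (PySem.List.slice vector none (some 1)) =
        (PySem.List.slice vector none (some 1), "") := by
      apply pvRecB_short
      rw [PySem.List.slice_to _ (by norm_num : (0 : Int) ≤ 1)]
      have := List.length_take_le (1 : Int).toNat vector
      simp only [Int.toNat_one] at this ⊢
      omega
    rw [hshort]
    simp
  · obtain ⟨hh1, hh2⟩ := pvMain size.toNat vector size rfl h1 hlen [] ""
    rw [PySem.List.slice_to _ (by omega : (0 : Int) ≤ size)]
    simp only [List.append_nil] at hh1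
    rw [String.append_empty] at hh2
    exact Prod.ext (by simpa using hh1) (by simpa using hh2)
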